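-- pv_equiv track=rewrite | github.com/somekindofpast/codewars-python | array/battleship_field_validator_ii.py | _add_ship_combinations
-- ===== SOURCE A (Python) =====
-- import copy
--
-- def _add_ship_combinations(battlefield: list[list[int]], ship_size: int) -> list[list[list[int]]]:
--     combinations = []
--     for row in range(len(battlefield)):
--         for col in range(len(battlefield[row])):
--             if battlefield[row][col] == 1:
--                 length = 0
--                 for j in range(col, len(battlefield[row])):
--                     if battlefield[row][j] == 1:
--                         length += 1
--                     else:
--                         length = 0
--                         break
--                     if ship_size == length:
--                         break
--                 if ship_size <= length:
--                     bf = copy.deepcopy(battlefield)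
--                     for j in range(col, col + ship_size):
--                         bf[row][j] = ship_size
--                     combinations.append(bf)
--
--                 length = 0
--                 for i in range(row, len(battlefield)):
--                     if battlefield[i][col] == 1:
--                         length += 1
--                     else:
--                         length = 0
--                         break
--                     if ship_size == length:
--                         break
--                 if ship_size <= length:
--                     bf = copy.deepcopy(battlefield)
--                     for i in range(row, row + ship_size):
--                         bf[i][col] = ship_size
--                     combinations.append(bf)
--     return combinations
-- ===== SOURCE B (Python) =====
-- import copy
--
-- def _add_ship_combinations(battlefield: list[list[int]], ship_size: int) -> list[list[list[int]]]:
--     # run-length tables: right[r][c] = consecutive 1s starting at (r,c) going right,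
--     # down[r][c] = consecutive 1s going down (a missing cell in a shorter row breaks a run)
--     right = []
--     for row in battlefield:
--         rr = [0] * len(row)
--         nxt = 0
--         for c in range(len(row) - 1, -1, -1):
--             nxt = 1 + nxt if row[c] == 1 else 0
--             rr[c] = nxt
--         right.append(rr)
--     down = [[0] * len(row) for row in battlefield]
--     below = []
--     for r in range(len(battlefield) - 1, -1, -1):
--         row = battlefield[r]
--         for c in range(len(row)):
--             b = below[c] if c < len(below) else 0
--             down[r][c] = 1 + b if row[c] == 1 else 0
--         below = down[r]
--     combinations = []
--     for r, row in enumerate(battlefield):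
--         for c, cell in enumerate(row):
--             if cell == 1:
--                 if right[r][c] >= ship_size:
--                     bf = copy.deepcopy(battlefield)
--                     for j in range(c, c + ship_size):
--                         bf[r][j] = ship_size
--                     combinations.append(bf)
--                 if down[r][c] >= ship_size:
--                     bf = copy.deepcopy(battlefield)
--                     for i in range(r, r + ship_size):
--                         bf[i][c] = ship_size
--                     combinations.append(bf)
--     return combinations
-- ===== Notes on version B (the rewrite author's own statement) =====
-- stated objective: alternative
-- what changed: B precomputes two run-length tables (consecutive 1s rightward per row, downward per column, built with accumulator sweeps) and then does one row-major placement pass comparing the table entry against ship_size, instead of A's per-cell rescans along the row and column; result order and values are identical.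
import Mathlib
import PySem

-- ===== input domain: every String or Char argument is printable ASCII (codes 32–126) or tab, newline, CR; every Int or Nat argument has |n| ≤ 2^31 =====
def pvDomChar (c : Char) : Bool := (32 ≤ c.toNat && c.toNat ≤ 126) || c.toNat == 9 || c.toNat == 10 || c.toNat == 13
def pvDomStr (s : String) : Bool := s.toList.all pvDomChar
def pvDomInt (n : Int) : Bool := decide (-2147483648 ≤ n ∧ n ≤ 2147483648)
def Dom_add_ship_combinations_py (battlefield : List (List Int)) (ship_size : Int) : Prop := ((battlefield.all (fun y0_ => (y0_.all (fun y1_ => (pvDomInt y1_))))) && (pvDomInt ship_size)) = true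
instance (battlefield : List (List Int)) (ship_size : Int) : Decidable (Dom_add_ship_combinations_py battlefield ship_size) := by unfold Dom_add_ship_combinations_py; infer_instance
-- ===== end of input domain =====

-- B replaces A's per-cell rescans by two run-length tables (right/down) built once, then a
-- single row-major placement pass; objective: alternative (same order of results, no rescans).

-- ===== PORT A =====
-- horizontal scan: 'for j in range(col, len(row)): …' walking the index list, acc = length
def pvScanH (row : List Int) (s : Int) : List Nat → Int → Int
  | [], len => len
  | j :: js, len =>
      if row.getD j 0 == 1 then
        (if s == len + 1 then len + 1 else pvScanH row s js (len + 1))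
      else 0

-- vertical scan: 'for i in range(row, len(battlefield)): … battlefield[i][col] …';
-- the read battlefield[i][col] can raise IndexError on a too-short row: that is the
-- `none` branch below; Pre_ excludes exactly those inputs (value there is irrelevant).
def pvScanV (bf : List (List Int)) (c : Nat) (s : Int) : List Nat → Int → Int
  | [], len => len
  | i :: is, len =>
      match (bf.getD i [])[c]? with
      | some v =>
          if v == 1 then
            (if s == len + 1 then len + 1 else pvScanV bf c s is (len + 1))
          else 0
      | none => 0

-- 'bf = deepcopy(battlefield); for j in range(col, col+ship_size): bf[row][j] = ship_size'
-- (range(c, c+s) = List.range' c s.toNat; all written indices are in range when the guard held)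
def pvPlaceH (bf : List (List Int)) (r c : Nat) (s : Int) : List (List Int) :=
  bf.set r ((List.range' c s.toNat).foldl (fun rw j => rw.set j s) (bf.getD r []))

-- 'bf = deepcopy(battlefield); for i in range(row, row+ship_size): bf[i][col] = ship_size'
def pvPlaceV (bf : List (List Int)) (r c : Nat) (s : Int) : List (List Int) :=
  (List.range' r s.toNat).foldl (fun b i => b.set i ((b.getD i []).set c s)) bf

def add_ship_combinations_py (battlefield : List (List Int)) (ship_size : Int) : List (List (List Int)) :=
  (List.range battlefield.length).foldl (fun acc r =>
    (List.range (battlefield.getD r []).length).foldl (fun acc c =>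
      if (battlefield.getD r []).getD c 0 == 1 then
        let acc1 :=
          if ship_size ≤ pvScanH (battlefield.getD r []) ship_size
              (List.range' c ((battlefield.getD r []).length - c)) 0
          then acc ++ [pvPlaceH battlefield r c ship_size] else acc
        if ship_size ≤ pvScanV battlefield c ship_size
            (List.range' r (battlefield.length - r)) 0
        then acc1 ++ [pvPlaceV battlefield r c ship_size] else acc1
      else acc) acc) []

-- ===== PORT B =====
-- per-row table of rightward run lengths, built right-to-left ('nxt' accumulator = foldr)
def pvRightRow : List Int → List Int
  | [] => []
  | x :: xs =>
      let rest := pvRightRow xs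
      (if x == 1 then 1 + rest.headD 0 else 0) :: rest

-- one row of the downward table from the row below it ('below[c] if c < len(below) else 0')
def pvDownRow : List Int → List Int → List Int
  | [], _ => []
  | x :: xs, below => (if x == 1 then 1 + below.headD 0 else 0) :: pvDownRow xs (below.drop 1)

-- downward table, built bottom-up ('below' accumulator = structural recursion)
def pvDownTable : List (List Int) → List (List Int)
  | [] => []
  | row :: rest =>
      let d := pvDownTable rest
      pvDownRow row (d.headD []) :: d

-- (the two placement loops in Source B are character-for-character those of A; pvPlaceH/pvPlaceV are shared)
def add_ship_combinations_py_alt (battlefield : List (List Int)) (ship_size : Int) : List (List (List Int)) :=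
  let right := battlefield.map pvRightRow
  let down := pvDownTable battlefield
  (PySem.List.enumerate battlefield).foldl (fun acc rrow =>
    (PySem.List.enumerate rrow.2).foldl (fun acc ccell =>
      if ccell.2 == 1 then
        let acc1 :=
          if ship_size ≤ PySem.List.pyGetD (PySem.List.pyGetD right rrow.1 []) ccell.1 0
          then acc ++ [pvPlaceH battlefield rrow.1.toNat ccell.1.toNat ship_size] else acc
        if ship_size ≤ PySem.List.pyGetD (PySem.List.pyGetD down rrow.1 []) ccell.1 0
        then acc1 ++ [pvPlaceV battlefield rrow.1.toNat ccell.1.toNat ship_size] else acc1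
      else acc) acc) []

-- ===== PRECONDITION & SPEC =====
-- Pre_ excludes exactly the inputs on which A raises IndexError: a 1-cell (r, c) whose
-- vertical scan, before breaking at a non-1 cell or at length == ship_size, reaches a row i
-- shorter than c+1 (the read battlefield[i][c] then raises).  A returns normally otherwise.
def pvNoRaise (bf : List (List Int)) (s : Int) : Bool :=
  (List.range bf.length).all fun r =>
    (List.range (bf.getD r []).length).all fun c =>
      ((bf.getD r []).getD c 0 != 1) ||
      (List.range bf.length).all fun i =>
        decide (i ≤ r) ||
        !((List.range i).all fun i2 =>
            decide (i2 ≤ r) ||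
            (decide (c < (bf.getD i2 []).length) && ((bf.getD i2 []).getD c 0 == 1))) ||
        (decide (1 ≤ s) && decide (s ≤ (i : Int) - (r : Int))) ||
        decide (c < (bf.getD i []).length)

def Pre_add_ship_combinations_py (battlefield : List (List Int)) (ship_size : Int) : Prop :=
  pvNoRaise battlefield ship_size = true

instance (battlefield : List (List Int)) (ship_size : Int) : Decidable (Pre_add_ship_combinations_py battlefield ship_size) := by
  unfold Pre_add_ship_combinations_py; infer_instance

def pvWitness_add_ship_combinations_py : List (List Int) × Int := ([[1, 1], [1, 0]], 2)

def Spec_add_ship_combinations_py (battlefield : List (List Int)) (ship_size : Int) (out : List (List (List Int))) : Prop := out = add_ship_combinations_py_alt battlefield ship_size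
instance (battlefield : List (List Int)) (ship_size : Int) (out : List (List (List Int))) : Decidable (Spec_add_ship_combinations_py battlefield ship_size out) := by unfold Spec_add_ship_combinations_py; infer_instance

-- ===== CLAIM (what is proved, stated in full; the proofs are below) =====
def Claim_equal_add_ship_combinations_py : Prop := ∀ (battlefield : List (List Int)) (ship_size : Int), Dom_add_ship_combinations_py battlefield ship_size → Pre_add_ship_combinations_py battlefield ship_size → Spec_add_ship_combinations_py battlefield ship_size (add_ship_combinations_py battlefield ship_size)

-- ===== LEMMAS AND PROOFS =====

-- proof-side positional form of the horizontal scan (walks the suffix of the row)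
def pvScan' (s : Int) : List Int → Int → Int
  | [], len => len
  | x :: xs, len =>
      if x == 1 then (if s == len + 1 then len + 1 else pvScan' s xs (len + 1)) else 0

-- run length of leading 1s (headD of pvRightRow)
def pvRun : List Int → Int
  | [] => 0
  | x :: xs => if x == 1 then 1 + pvRun xs else 0

theorem pvRun_nonneg (t : List Int) : 0 ≤ pvRun t := by
  induction t with
  | nil => simp [pvRun]
  | cons x xs ih => simp only [pvRun]; split <;> omega

theorem pvRightRow_headD (t : List Int) : (pvRightRow t).headD 0 = pvRun t := by
  induction t with
  | nil => rfl
  | cons x xs ih =>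
      simp only [pvRightRow, pvRun, ← ih]
      cases pvRightRow xs <;> simp [List.headD]

theorem pvRightRow_getD (row : List Int) : ∀ c, (pvRightRow row).getD c 0 = pvRun (row.drop c) := by
  induction row with
  | nil => intro c; simp [pvRightRow, pvRun]
  | cons x xs ih =>
      intro c
      cases c with
      | zero => simpa [pvRightRow, pvRun] using congrArg (fun v => if x = 1 then 1 + v else 0) (pvRightRow_headD xs)
      | succ c => simpa [pvRightRow] using ih c

theorem pvScanH_eq_scan' (row : List Int) (s : Int) :
    ∀ n c acc, c + n = row.length →
      pvScanH row s (List.range' c n) acc = pvScan' s (row.drop c) acc := by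
  intro n
  induction n with
  | zero =>
      intro c acc h
      have : c = row.length := by omega
      subst this
      simp [pvScanH, pvScan', List.drop_length]
  | succ n ih =>
      intro c acc h
      have hc : c < row.length := by omega
      have hdrop : row.drop c = row[c] :: row.drop (c + 1) := List.drop_eq_getElem_cons hc
      have hget : row.getD c 0 = row[c] := List.getD_eq_getElem row 0 hc
      rw [List.range'_succ, hdrop]
      simp only [pvScanH, pvScan', hget]
      split
      · split
        · rfl
        · exact ih (c + 1) (acc + 1) (by omega)
      · rfl

theorem pvScan'_iff (s : Int) :
    ∀ (t : List Int) (acc : Int), 0 ≤ acc → ¬(1 ≤ s ∧ s ≤ acc) →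
      ((s ≤ pvScan' s t acc) ↔ (s ≤ acc + pvRun t)) := by
  intro t
  induction t with
  | nil => intro acc h0 hs; simp [pvScan', pvRun]
  | cons x xs ih =>
      intro acc h0 hs
      simp only [pvScan', pvRun]
      by_cases hx : x = 1
      · simp only [hx, beq_self_eq_true, if_true]
        by_cases hb : s = acc + 1
        · have h1 : (s == acc + 1) = true := by simp [hb]
          rw [h1]
          simp only [if_true]
          have := pvRun_nonneg xs
          constructor <;> intro _ <;> omega
        · have h1 : (s == acc + 1) = false := by simp [hb]
          rw [h1]
          simp only [Bool.false_eq_true, if_false]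
          have := ih (acc + 1) (by omega) (by omega)
          rw [this]
          constructor <;> intro h <;> omega
      · have hx' : (x == 1) = false := by simp [hx]
        rw [hx']
        simp only [Bool.false_eq_true, if_false]
        omega

theorem pvScanV_eq_scan' (bf : List (List Int)) (c : Nat) (s : Int) :
    ∀ n r acc, r + n = bf.length →
      pvScanV bf c s (List.range' r n) acc
        = pvScan' s ((bf.drop r).map (fun row => (row[c]?).getD 0)) acc := by
  intro n
  induction n with
  | zero =>
      intro r acc h
      have : r = bf.length := by omega
      subst this
      simp [pvScanV, pvScan', List.drop_length]
  | succ n ih =>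
      intro r acc h
      have hr : r < bf.length := by omega
      have hdrop : bf.drop r = bf[r] :: bf.drop (r + 1) := List.drop_eq_getElem_cons hr
      have hget : bf.getD r [] = bf[r] := List.getD_eq_getElem bf [] hr
      rw [List.range'_succ, hdrop]
      simp only [pvScanV, pvScan', List.map_cons, hget]
      cases hoc : bf[r][c]? with
      | none => simp
      | some v =>
          simp only [Option.getD_some]
          split
          · split
            · rfl
            · exact ih (r + 1) (acc + 1) (by omega)
          · rfl

theorem getD_drop_one {α : Type} (l : List α) (c : Nat) (d : α) :
    (l.drop 1).getD c d = l.getD (c + 1) d := by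
  cases l <;> simp

theorem pvDownRow_getD (row : List Int) : ∀ (below : List Int) (c : Nat),
    (pvDownRow row below).getD c 0
      = if h : c < row.length then (if row[c] = 1 then 1 + below.getD c 0 else 0) else 0 := by
  induction row with
  | nil => intro below c; simp [pvDownRow]
  | cons x xs ih =>
      intro below c
      cases c with
      | zero =>
          simp only [pvDownRow, List.getD_cons_zero, List.length_cons, Nat.zero_lt_succ,
            dif_pos, List.getElem_cons_zero]
          have : below.getD 0 0 = below.headD 0 := by cases below <;> rfl
          rw [this]
          split <;> simp_all
      | succ c =>
          simp only [pvDownRow, List.getD_cons_succ, ih, List.length_cons,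
            Nat.succ_lt_succ_iff, List.getElem_cons_succ, getD_drop_one]
          rfl

theorem pvDownTable_getD (bf : List (List Int)) :
    ∀ r c, ((pvDownTable bf).getD r []).getD c 0
      = pvRun ((bf.drop r).map (fun row => (row[c]?).getD 0)) := by
  induction bf with
  | nil => intro r c; simp [pvDownTable, pvRun]
  | cons row rest ih =>
      intro r c
      cases r with
      | zero =>
          simp only [pvDownTable, List.getD_cons_zero, List.drop_zero, List.map_cons, pvRun]
          rw [pvDownRow_getD]
          have hbelow : ((pvDownTable rest).headD []).getD c 0
              = pvRun ((rest.drop 0).map (fun row => (row[c]?).getD 0)) := by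
            have : (pvDownTable rest).headD [] = (pvDownTable rest).getD 0 [] := by
              cases pvDownTable rest <;> rfl
            rw [this, ih 0 c]
          rw [hbelow, List.drop_zero]
          by_cases hc : c < row.length
          · have : row[c]? = some row[c] := List.getElem?_eq_getElem hc
            simp only [dif_pos hc, this, Option.getD_some]
            split <;> simp_all
          · simp [hc]
      | succ r =>
          simpa [pvDownTable] using ih r c

theorem condH (row : List Int) (s : Int) (c : Nat) :
    (s ≤ pvScanH row s (List.range' c (row.length - c)) 0)
      ↔ (s ≤ (pvRightRow row).getD c 0) := by
  rw [pvRightRow_getD]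
  by_cases hc : c ≤ row.length
  · rw [pvScanH_eq_scan' row s (row.length - c) c 0 (by omega),
      pvScan'_iff s (row.drop c) 0 (by omega) (by omega)]
    omega
  · rw [show row.length - c = 0 from by omega, List.drop_eq_nil_of_le (by omega)]
    simp [pvScanH, pvRun]

theorem condV (bf : List (List Int)) (c : Nat) (s : Int) (r : Nat) :
    (s ≤ pvScanV bf c s (List.range' r (bf.length - r)) 0)
      ↔ (s ≤ ((pvDownTable bf).getD r []).getD c 0) := by
  rw [pvDownTable_getD]
  by_cases hr : r ≤ bf.length
  · rw [pvScanV_eq_scan' bf c s (bf.length - r) r 0 (by omega),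
      pvScan'_iff s _ 0 (by omega) (by omega)]
    omega
  · rw [show bf.length - r = 0 from by omega, List.drop_eq_nil_of_le (by omega)]
    simp [pvScanV, pvRun]

theorem foldl_enumerate {α β : Type} (l : List α) (d : α) (f : β → (Int × α) → β) (init : β) :
    (PySem.List.enumerate l).foldl f init
      = (List.range l.length).foldl (fun (b : β) (i : Nat) => f b ((i : Int), l.getD i d)) init := by
  rw [PySem.List.enumerate_eq_map_pyRange l d, PySem.List.len_eq, PySem.List.pyRange_zero_nat,
    List.foldl_map, List.foldl_map]
  simp

theorem map_rightRow_getD (bf : List (List Int)) (r : Nat) :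
    (List.map pvRightRow bf).getD r [] = pvRightRow (bf.getD r []) := by
  rcases Nat.lt_or_ge r bf.length with hr | hr
  · rw [List.getD_eq_getElem _ _ (by simpa using hr), List.getD_eq_getElem _ _ hr,
      List.getElem_map]
  · rw [List.getD_eq_default _ _ (by simpa using hr), List.getD_eq_default _ _ hr]
    rfl

theorem add_ship_combinations_eq (bf : List (List Int)) (s : Int) :
    add_ship_combinations_py bf s = add_ship_combinations_py_alt bf s := by
  unfold add_ship_combinations_py add_ship_combinations_py_alt
  rw [foldl_enumerate bf ([] : List Int) _ ([] : List (List (List Int)))]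
  congr 1
  funext acc r
  rw [foldl_enumerate (bf.getD r []) (0 : Int) _ acc]
  congr 1
  funext acc c
  simp only [PySem.List.pyGetD_natCast, Int.toNat_natCast, map_rightRow_getD,
    ← condH, ← condV]

-- ===== VERDICT (by name: the statement is the Claim_ definition above) =====
theorem add_ship_combinations_py_spec : Claim_equal_add_ship_combinations_py := by
  intro bf s _ _
  unfold Spec_add_ship_combinations_py
  exact add_ship_combinations_eq bf s
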